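-- pv_equiv track=rewrite | github.com/knslee07/icml2026 | src/inference.py | _extract_names_with_quotes
-- ===== SOURCE A (Python) =====
-- from typing import List, Dict, Set, Tuple
--
-- def _extract_names_with_quotes(raw: str) -> List[str]:
--     """Extract single-quoted names using state machine.
--
--     Handles possessives (Cook's) and edge cases.
--     """
--     names = []
--     in_quote = False
--     current_name = ""
--     i = 0
--
--     while i < len(raw):
--         char = raw[i]
--
--         if char == "'" and not in_quote:
--             in_quote = True
--             current_name = ""
--         elif char == "'" and in_quote:
--             if i + 1 < len(raw) and raw[i + 1] == 's':
--                 current_name += char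
--             else:
--                 in_quote = False
--                 if current_name.strip():
--                     names.append(current_name.strip())
--                 current_name = ""
--         elif in_quote:
--             current_name += char
--
--         i += 1
--
--     return names
-- ===== SOURCE B (Python) =====
-- def _find_close(rest):
--     """Index of the closing quote in rest: the first "'" not followed by 's'; -1 if none."""
--     j = 0
--     while j < len(rest):
--         if rest[j] == "'" and rest[j + 1:j + 2] != 's':
--             return j
--         j += 1
--     return -1
--
-- def _extract_names_with_quotes(raw):
--     """Extract single-quoted names by find/slice instead of a char state machine."""
--     names = []
--     rest = raw
--     while True:
--         i = rest.find("'")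
--         if i == -1:
--             return names
--         rest = rest[i + 1:]
--         j = _find_close(rest)
--         if j == -1:
--             return names
--         name = rest[:j].strip()
--         if name:
--             names.append(name)
--         rest = rest[j + 1:]
-- ===== Notes on version B (the rewrite author's own statement) =====
-- stated objective: alternative
-- what changed: Replaces A's single-pass boolean state machine (in_quote flag + per-char accumulator) with a find-open / split-at-close decomposition: skip to the next opening quote, scan for the closing quote (one not followed by 's'), slice out the content, repeat on the remainder.
import Mathlib
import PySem

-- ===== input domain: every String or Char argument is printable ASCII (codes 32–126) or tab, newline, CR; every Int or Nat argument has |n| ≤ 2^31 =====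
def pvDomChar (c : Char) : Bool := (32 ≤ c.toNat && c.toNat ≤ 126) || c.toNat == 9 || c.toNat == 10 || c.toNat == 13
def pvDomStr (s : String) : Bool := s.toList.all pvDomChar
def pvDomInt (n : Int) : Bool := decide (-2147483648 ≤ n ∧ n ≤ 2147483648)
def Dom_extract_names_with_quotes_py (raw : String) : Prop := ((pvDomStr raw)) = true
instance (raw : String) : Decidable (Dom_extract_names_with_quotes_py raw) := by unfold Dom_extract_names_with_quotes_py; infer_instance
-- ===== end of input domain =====

-- B replaces A's one-pass boolean state machine (in_quote flag + char accumulator) with a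
-- find-open / split-at-close decomposition over the remaining string; objective: alternative.

-- ===== PORT A =====
-- the while loop of A: state (in_quote, current_name, names), one char at a time;
-- `raw[i+1] == 's'` lookahead becomes `rest.head? = some 's'`
def pvA_loop : List Char → Bool → List Char → List String → List String
  | [], _, _, names => names
  | c :: rest, inq, cur, names =>
    if c = '\'' ∧ inq = false then
      pvA_loop rest true [] names
    else if c = '\'' ∧ inq = true then
      if rest.head? = some 's' then
        pvA_loop rest inq (cur ++ [c]) names
      else
        pvA_loop rest false []
          (if PySem.Chars.strip cur ≠ [] then names ++ [String.ofList (PySem.Chars.strip cur)] else names)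
    else if inq = true then
      pvA_loop rest inq (cur ++ [c]) names
    else
      pvA_loop rest inq cur names

def extract_names_with_quotes_py (raw : String) : List String :=
  pvA_loop raw.toList false [] []

-- ===== PORT B =====
-- _after_open: scan for "'", return the remainder after it (None if absent)
def pvAfterOpen : List Char → Option (List Char)
  | [] => none
  | c :: r => if c = '\'' then some r else pvAfterOpen r

-- _split_close: scan for the closing "'" (one not followed by 's'),
-- return (content before it, remainder after it); None if unterminated
def pvSplitClose : List Char → Option (List Char × List Char)
  | [] => none
  | c :: r =>
    if c = '\'' ∧ r.head? ≠ some 's' then some ([], r)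
    else
      match pvSplitClose r with
      | none => none
      | some (content, rest) => some (c :: content, rest)

theorem pvAfterOpen_length : ∀ {s r : List Char}, pvAfterOpen s = some r → r.length < s.length := by
  intro s
  induction s with
  | nil => intro r h; simp [pvAfterOpen] at h
  | cons c t ih =>
    intro r h
    simp only [pvAfterOpen] at h
    split at h
    · cases h; simp
    · exact Nat.lt_trans (ih h) (by simp)

theorem pvSplitClose_length : ∀ {s : List Char} {content rest : List Char},
    pvSplitClose s = some (content, rest) → rest.length < s.length := by
  intro s
  induction s with
  | nil => intro content rest h; simp [pvSplitClose] at h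
  | cons c t ih =>
    intro content rest h
    simp only [pvSplitClose] at h
    split at h
    · cases h; simp
    · cases hrec : pvSplitClose t with
      | none => rw [hrec] at h; cases h
      | some p =>
        rw [hrec] at h
        cases h
        exact Nat.lt_trans (ih hrec) (by simp)

-- the outer while loop of B: one iteration per quoted name
def pvB_loop (rest : List Char) (names : List String) : List String :=
  match h : pvSplitClose rest with
  | none => names
  | some (content, rest2) =>
    let name := PySem.Chars.strip content
    let names' := if name ≠ [] then names ++ [String.ofList name] else names
    match h2 : pvAfterOpen rest2 with
    | none => names'
    | some rest3 => pvB_loop rest3 names'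
termination_by rest.length
decreasing_by
  exact Nat.lt_trans (pvAfterOpen_length h2) (pvSplitClose_length h)

def extract_names_with_quotes_py_alt (raw : String) : List String :=
  match pvAfterOpen raw.toList with
  | none => []
  | some rest => pvB_loop rest []

-- ===== PRECONDITION & SPEC =====
def Spec_extract_names_with_quotes_py (raw : String) (out : List String) : Prop := out = extract_names_with_quotes_py_alt raw
instance (raw : String) (out : List String) : Decidable (Spec_extract_names_with_quotes_py raw out) := by unfold Spec_extract_names_with_quotes_py; infer_instance

-- ===== CLAIM (what is proved, stated in full; the proofs are below) =====
def Claim_equal_extract_names_with_quotes_py : Prop := ∀ (raw : String), Dom_extract_names_with_quotes_py raw → Spec_extract_names_with_quotes_py raw (extract_names_with_quotes_py raw)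

-- ===== LEMMAS AND PROOFS =====

-- A's not-in-quote phase is B's _after_open
theorem pvA_notin (s : List Char) : ∀ (names : List String),
    pvA_loop s false [] names =
      match pvAfterOpen s with
      | none => names
      | some r => pvA_loop r true [] names := by
  induction s with
  | nil => intro names; simp [pvA_loop, pvAfterOpen]
  | cons c t ih =>
    intro names
    by_cases hc : c = '\''
    · simp [pvA_loop, pvAfterOpen, hc]
    · simp [pvA_loop, pvAfterOpen, hc, ih names]

-- A's in-quote phase is B's _split_close (cur generalizes the accumulated prefix)
theorem pvA_in (s : List Char) : ∀ (cur : List Char) (names : List String),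
    pvA_loop s true cur names =
      match pvSplitClose s with
      | none => names
      | some (content, rest2) =>
        pvA_loop rest2 false []
          (if PySem.Chars.strip (cur ++ content) ≠ [] then
             names ++ [String.ofList (PySem.Chars.strip (cur ++ content))] else names) := by
  induction s with
  | nil => intro cur names; simp [pvA_loop, pvSplitClose]
  | cons c t ih =>
    intro cur names
    by_cases hc : c = '\''
    · subst hc
      by_cases hs : t.head? = some 's'
      · rw [show pvA_loop ('\'' :: t) true cur names = pvA_loop t true (cur ++ ['\'']) names from by
          simp [pvA_loop, hs], ih]
        cases hrec : pvSplitClose t with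
        | none => simp [pvSplitClose, hs, hrec]
        | some p =>
          obtain ⟨content, rest2⟩ := p
          simp [pvSplitClose, hs, hrec, List.append_assoc]
      · simp [pvA_loop, pvSplitClose, hs]
    · rw [show pvA_loop (c :: t) true cur names = pvA_loop t true (cur ++ [c]) names from by
        simp [pvA_loop, hc], ih]
      cases hrec : pvSplitClose t with
      | none => simp [pvSplitClose, hc, hrec]
      | some p =>
        obtain ⟨content, rest2⟩ := p
        simp [pvSplitClose, hc, hrec, List.append_assoc]

-- the two loops agree, by strong induction on the remaining length
theorem pvMain : ∀ (n : Nat) (s : List Char) (names : List String), s.length ≤ n →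
    pvA_loop s false [] names =
      match pvAfterOpen s with
      | none => names
      | some r => pvB_loop r names := by
  intro n
  induction n with
  | zero =>
    intro s names hlen
    have : s = [] := List.eq_nil_of_length_eq_zero (Nat.le_zero.mp hlen)
    subst this
    simp [pvA_loop, pvAfterOpen]
  | succ n ih =>
    intro s names hlen
    rw [pvA_notin s names]
    cases hopen : pvAfterOpen s with
    | none => rfl
    | some r =>
      have hr : r.length < s.length := pvAfterOpen_length hopen
      show pvA_loop r true [] names = pvB_loop r names
      rw [pvA_in r [] names, pvB_loop]
      cases hclose : pvSplitClose r with
      | none => rfl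
      | some p =>
        obtain ⟨content, rest2⟩ := p
        simp only [List.nil_append]
        have h2 : rest2.length ≤ n :=
          Nat.le_of_lt_succ (Nat.lt_of_lt_of_le (Nat.lt_of_lt_of_le (pvSplitClose_length hclose) (Nat.le_of_lt hr)) hlen)
        rw [ih rest2 _ h2]
        cases pvAfterOpen rest2 <;> rfl

-- ===== VERDICT (by name: the statement is the Claim_ definition above) =====
theorem extract_names_with_quotes_py_spec : Claim_equal_extract_names_with_quotes_py := by
  intro raw _
  unfold Spec_extract_names_with_quotes_py extract_names_with_quotes_py extract_names_with_quotes_py_alt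
  exact pvMain raw.toList.length raw.toList [] (Nat.le_refl _)
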